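-- pv_equiv track=rewrite | github.com/stepkagrigoriev/testing_practice | main.py | dict_find
-- ===== SOURCE A (Python) =====
-- def dict_find(words):
--     prefix = dict()
--     best = 0
--     best_pair = None
--     for w in words:
--         for l in range(1, len(w) + 1):
--             if w[:l] not in prefix:
--                 prefix[w[:l]] = {w:''}
--             else:
--                 prefix[w[:l]][w] = ''
--
--     for word in words:
--         for l in range(len(word), 0 ,-1):
--             suf = word[-l:]
--             if suf in prefix:
--                 for second_word in prefix[suf]:
--                     if second_word != word:
--                         if l > best:
--                             best = l
--                             best_pair = (word, second_word)
--     return best, best_pair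
-- ===== SOURCE B (Python) =====
-- def dict_find(words):
--     # Direct search: no prefix index; for each word scan overlap lengths
--     # downward, stopping at the first (hence longest) length that beats the
--     # current best and is witnessed by some other word, then break.
--     best = 0
--     best_pair = None
--     for word in words:
--         for l in range(len(word), best, -1):
--             suf = word[-l:]
--             second = next((w for w in words if w != word and w.startswith(suf)), None)
--             if second is not None:
--                 best = l
--                 best_pair = (word, second)
--                 break
--     return best, best_pair
-- ===== Notes on version B (the rewrite author's own statement) =====
-- stated objective: simpler
-- what changed: B drops A's two-phase dict-of-dicts prefix index entirely and instead, per word, scans candidate overlap lengths downward from len(word) to the current best and takes the first other word (in list order) starting with that suffix, breaking on the first hit.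
import Mathlib
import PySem

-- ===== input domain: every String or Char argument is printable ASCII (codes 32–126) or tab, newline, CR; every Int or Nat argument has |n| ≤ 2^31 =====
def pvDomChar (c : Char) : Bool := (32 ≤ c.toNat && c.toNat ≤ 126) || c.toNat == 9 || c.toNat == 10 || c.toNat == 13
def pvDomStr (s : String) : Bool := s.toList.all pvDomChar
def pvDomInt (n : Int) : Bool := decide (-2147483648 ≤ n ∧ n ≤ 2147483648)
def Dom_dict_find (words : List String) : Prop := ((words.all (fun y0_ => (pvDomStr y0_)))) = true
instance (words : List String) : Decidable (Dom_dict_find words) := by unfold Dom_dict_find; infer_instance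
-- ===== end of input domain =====

-- B replaces A's dict-of-dicts prefix index by a direct pairwise scan with an
-- early break (simpler, not faster); return values proved equal on all inputs.


-- ===== PORT A =====
-- A's state: the prefix index, a dict from each nonempty prefix to the dict
-- (used as an ordered set) of words having that prefix.

-- one iteration of A's index-building inner loop: insert w under key w[:l]
def aInsertWord (pre : PySem.Dict String (PySem.Dict String String)) (w : String)
    (l : Int) : PySem.Dict String (PySem.Dict String String) :=
  match pre.get? (PySem.Str.slice w none (some l)) with
  | none => pre.insert (PySem.Str.slice w none (some l)) (PySem.Dict.empty.insert w "")
  | some d => pre.insert (PySem.Str.slice w none (some l)) (d.insert w "")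

-- A's first loop: for w in words: for l in range(1, len(w)+1): …
def aBuild (words : List String) : PySem.Dict String (PySem.Dict String String) :=
  words.foldl (fun pre w =>
    (PySem.List.pyRange 1 (PySem.Str.len w + 1) 1).foldl (fun pre l => aInsertWord pre w l) pre)
    PySem.Dict.empty

-- A's innermost update: if second_word != word: if l > best: …
def aUpd (word : String) (l : Int) (st : Int × Option (String × String))
    (second : String) : Int × Option (String × String) :=
  if second != word then (if l > st.1 then (l, some (word, second)) else st) else st

-- body of A's second loop over l: suf = word[-l:]; if suf in prefix: for second_word in prefix[suf]: …
def aInner (P : PySem.Dict String (PySem.Dict String String)) (word : String)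
    (st : Int × Option (String × String)) (l : Int) : Int × Option (String × String) :=
  let suf := PySem.Str.slice word (some (-l)) none
  match P.get? suf with
  | none => st
  | some d => d.keys.foldl (aUpd word l) st

def dict_find (words : List String) : Int × (Option (String × String)) :=
  let pfx := aBuild words
  words.foldl (fun st word =>
    (PySem.List.pyRange (PySem.Str.len word) 0 (-1)).foldl (aInner pfx word) st)
    (0, none)

-- ===== PORT B =====
-- next((w for w in words if w != word and w.startswith(suf)), None)
def bFind (words : List String) (word suf : String) : Option String :=
  words.find? (fun w => w != word && PySem.Str.startswith w suf)

-- B's per-word loop: for l in range(len(word), best, -1): … break on first hit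
def bStep (words : List String) (st : Int × Option (String × String))
    (word : String) : Int × Option (String × String) :=
  match (PySem.List.pyRange (PySem.Str.len word) st.1 (-1)).findSome? (fun l =>
      (bFind words word (PySem.Str.slice word (some (-l)) none)).map (fun s => (l, s))) with
  | some (l, s) => (l, some (word, s))
  | none => st

def dict_find_alt (words : List String) : Int × (Option (String × String)) :=
  words.foldl (bStep words) (0, none)

-- ===== PRECONDITION & SPEC =====
def Spec_dict_find (words : List String) (out : Int × (Option (String × String))) : Prop := out = dict_find_alt words
instance (words : List String) (out : Int × (Option (String × String))) : Decidable (Spec_dict_find words out) := by unfold Spec_dict_find; infer_instance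

-- ===== CLAIM (what is proved, stated in full; the proofs are below) =====
def Claim_equal_dict_find : Prop := ∀ (words : List String), Dom_dict_find words → Spec_dict_find words (dict_find words)

-- ===== LEMMAS AND PROOFS =====

-- the key list A's index stores under key s ([] when s is absent)
def aKeys (pre : PySem.Dict String (PySem.Dict String String)) (s : String) : List String :=
  match pre.get? s with
  | none => []
  | some d => d.keys

def addKey (ks : List String) (w : String) : List String :=
  if w ∈ ks then ks else ks ++ [w]

-- effect of one insertion on the stored key list
theorem aKeys_aInsertWord_eq (pre : PySem.Dict String (PySem.Dict String String))
    (w s : String) (l : Int) (h : PySem.Str.slice w none (some l) = s) :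
    aKeys (aInsertWord pre w l) s = addKey (aKeys pre s) w := by
  unfold aInsertWord aKeys addKey
  rw [h]
  cases hp : pre.get? s with
  | none =>
      dsimp only
      rw [PySem.Dict.get?_insert, if_pos rfl]; dsimp only
      rw [PySem.Dict.keys_insert_of_not_contains _ _ (PySem.Dict.contains_empty w)]
      simp [PySem.Dict.keys_empty]
  | some d =>
      dsimp only
      rw [PySem.Dict.get?_insert, if_pos rfl]; dsimp only
      by_cases hw : w ∈ d.keys
      · rw [PySem.Dict.keys_insert_of_contains _ _ ((PySem.Dict.contains_iff_mem_keys d w).mpr hw)]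
        simp [hw]
      · rw [PySem.Dict.keys_insert_of_not_contains _ _ (by
          cases hc : d.contains w
          · rfl
          · exact absurd ((PySem.Dict.contains_iff_mem_keys d w).mp hc) hw)]
        simp [hw]

theorem aKeys_aInsertWord_ne (pre : PySem.Dict String (PySem.Dict String String))
    (w s : String) (l : Int) (h : PySem.Str.slice w none (some l) ≠ s) :
    aKeys (aInsertWord pre w l) s = aKeys pre s := by
  unfold aInsertWord aKeys
  cases hp : pre.get? (PySem.Str.slice w none (some l)) <;>
    dsimp only <;> rw [PySem.Dict.get?_insert, if_neg (fun hh => h hh.symm)]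

theorem addKey_idem (ks : List String) (w : String) : addKey (addKey ks w) w = addKey ks w := by
  unfold addKey; by_cases h : w ∈ ks <;> simp [h]

-- effect of the whole inner loop over a list of lengths
theorem aKeys_foldl_insert (w s : String) (L : List Int)
    (pre : PySem.Dict String (PySem.Dict String String)) :
    aKeys (L.foldl (fun pre l => aInsertWord pre w l) pre) s =
      if L.any (fun l => PySem.Str.slice w none (some l) == s) then addKey (aKeys pre s) w
      else aKeys pre s := by
  induction L generalizing pre with
  | nil => simp
  | cons l L ih =>
      rw [List.foldl_cons, ih, List.any_cons]
      by_cases hd : PySem.Str.slice w none (some l) = s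
      · rw [aKeys_aInsertWord_eq pre w s l hd]
        simp [hd, addKey_idem]
      · rw [aKeys_aInsertWord_ne pre w s l hd]
        simp [hd]

theorem slice_toList_take (w : String) (l : Int) (hl : 0 ≤ l) :
    (PySem.Str.slice w none (some l)).toList = w.toList.take l.toNat := by
  rw [PySem.Str.toList_slice, PySem.Chars.slice_eq_listSlice, PySem.List.slice_to _ hl]

-- a nonempty s is some w[:l], l ∈ range(1, len w + 1), iff s is a prefix of w
theorem any_slice_eq_iff (w s : String) (hs : s.toList ≠ []) :
    (PySem.List.pyRange 1 (PySem.Str.len w + 1) 1).any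
        (fun l => PySem.Str.slice w none (some l) == s) = PySem.Str.startswith w s := by
  rw [Bool.eq_iff_iff]
  rw [PySem.Str.startswith_eq, PySem.Chars.startswith_iff]
  simp only [List.any_eq_true, PySem.List.mem_pyRange_one, beq_iff_eq]
  constructor
  · rintro ⟨l, ⟨h1, _⟩, hsl⟩
    rw [← hsl, ← String.toList_inj] at *
    rw [slice_toList_take w l (by omega)]
    exact List.take_prefix _ _
  · intro hpre
    have h0 : 0 < s.toList.length := List.length_pos_of_ne_nil hs
    refine ⟨(s.toList.length : Int), ⟨by omega, ?_⟩, ?_⟩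
    · have := hpre.length_le
      rw [PySem.Str.len_eq]; omega
    · rw [← String.toList_inj, slice_toList_take w _ (by omega)]
      simp only [Int.toNat_natCast]
      exact (List.prefix_iff_eq_take.mp hpre).symm

-- one word of the build loop
theorem aKeys_buildStep (pre : PySem.Dict String (PySem.Dict String String))
    (w s : String) (hs : s.toList ≠ []) :
    aKeys ((PySem.List.pyRange 1 (PySem.Str.len w + 1) 1).foldl (fun pre l => aInsertWord pre w l) pre) s =
      if PySem.Str.startswith w s then addKey (aKeys pre s) w else aKeys pre s := by
  rw [aKeys_foldl_insert, any_slice_eq_iff w s hs]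

theorem find?_beq_self_of_mem (l : List String) (w : String) (h : w ∈ l) :
    l.find? (· == w) = some w := by
  induction l with
  | nil => cases h
  | cons a l ih =>
      by_cases ha : a = w
      · subst ha; simp
      · rw [List.find?_cons_of_neg (by simp [ha])]
        cases h with
        | head => exact absurd rfl ha
        | tail _ h' => exact ih h'

-- the build invariant: find? on the stored key list = find? on the processed
-- words filtered by "has prefix s"
theorem find?_aKeys_buildfold (s : String) (hs : s.toList ≠ []) (ws : List String) :
    ∀ (pre : PySem.Dict String (PySem.Dict String String)) (done : List String),
    (∀ p, (aKeys pre s).find? p = (done.filter (fun w => PySem.Str.startswith w s)).find? p) →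
    ∀ p, (aKeys (ws.foldl (fun pre w =>
        (PySem.List.pyRange 1 (PySem.Str.len w + 1) 1).foldl (fun pre l => aInsertWord pre w l) pre) pre) s).find? p =
      ((done ++ ws).filter (fun w => PySem.Str.startswith w s)).find? p := by
  induction ws with
  | nil => intro pre done H p; simpa using H p
  | cons w ws ih =>
      intro pre done H p
      rw [List.foldl_cons]
      have H' : ∀ p, (aKeys ((PySem.List.pyRange 1 (PySem.Str.len w + 1) 1).foldl
          (fun pre l => aInsertWord pre w l) pre) s).find? p =
          ((done ++ [w]).filter (fun w => PySem.Str.startswith w s)).find? p := by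
        intro p
        rw [aKeys_buildStep pre w s hs, List.filter_append]
        by_cases hw : PySem.Str.startswith w s
        · rw [if_pos hw]
          have hw2 : PySem.Chars.startswith w.toList s.toList = true := by
            rw [← PySem.Str.startswith_eq]; exact hw
          have hfw : List.filter (fun w => PySem.Str.startswith w s) [w] = [w] := by
            simp [hw2]
          rw [hfw]
          unfold addKey
          by_cases hmem : w ∈ aKeys pre s
          · rw [if_pos hmem, List.find?_append, ← H p]
            have hw' := H (· == w)
            rw [find?_beq_self_of_mem _ _ hmem] at hw'
            have hmem' := List.mem_of_find?_eq_some hw'.symm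
            cases hX : (aKeys pre s).find? p with
            | some x => rfl
            | none =>
                have hpw : ¬ p w = true := by
                  rw [H p] at hX
                  exact List.find?_eq_none.mp hX w hmem'
                simp [List.find?, hpw]
          · rw [if_neg hmem, List.find?_append, List.find?_append, H p]
        · rw [if_neg hw]
          have hw2 : PySem.Chars.startswith w.toList s.toList = false := by
            rw [← PySem.Str.startswith_eq]; exact Bool.not_eq_true _ ▸ (Bool.eq_false_iff.mpr (fun hh => hw hh))
          have hfw : List.filter (fun w => PySem.Str.startswith w s) [w] = [] := by
            simp [hw2]
          rw [hfw, List.append_nil]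
          exact H p
      have hres := ih ((PySem.List.pyRange 1 (PySem.Str.len w + 1) 1).foldl
          (fun pre l => aInsertWord pre w l) pre) (done ++ [w]) H' p
      rw [hres, List.append_assoc]
      rfl

-- the build index, characterised through find?
theorem aKeys_find?_aBuild (words : List String) (s : String) (hs : s.toList ≠ [])
    (p : String → Bool) :
    (aKeys (aBuild words) s).find? p =
      (words.filter (fun w => PySem.Str.startswith w s)).find? p := by
  unfold aBuild
  have H : ∀ p, (aKeys PySem.Dict.empty s).find? p =
      (([] : List String).filter (fun w => PySem.Str.startswith w s)).find? p := by
    intro p; simp [aKeys, PySem.Dict.get?_empty]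
  simpa using find?_aKeys_buildfold s hs words PySem.Dict.empty [] H p

theorem suf_toList (word : String) (l : Int) (h1 : 1 ≤ l) :
    (PySem.Str.slice word (some (-l)) none).toList =
      word.toList.drop (word.toList.length - l.toNat) := by
  rw [PySem.Str.toList_slice, PySem.Chars.slice_eq_listSlice]
  have hl : l = ((l.toNat : Nat) : Int) := by omega
  rw [hl, PySem.List.slice_from_neg_natCast _ _ (by omega)]
  simp
  omega

theorem suf_ne_nil (word : String) (l : Int) (h1 : 1 ≤ l) (h2 : l ≤ PySem.Str.len word) :
    (PySem.Str.slice word (some (-l)) none).toList ≠ [] := by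
  rw [suf_toList word l h1]
  apply List.ne_nil_of_length_pos
  rw [List.length_drop]
  have := PySem.Str.len_eq word
  omega

-- the innermost keys-loop, characterised
theorem foldl_aUpd_eq (word : String) (l : Int) (ks : List String)
    (st : Int × Option (String × String)) :
    ks.foldl (aUpd word l) st =
      if st.1 < l then
        (match ks.find? (fun second => second != word) with
         | some sec => (l, some (word, sec))
         | none => st)
      else st := by
  induction ks generalizing st with
  | nil => simp
  | cons k ks ih =>
      rw [List.foldl_cons, ih]
      by_cases hl : st.1 < l
      · by_cases hk : (k != word) = true
        · have hupd : aUpd word l st k = (l, some (word, k)) := by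
            unfold aUpd; rw [if_pos hk, if_pos hl]
          rw [hupd, List.find?_cons_of_pos (p := fun second => second != word) hk, if_pos hl]
          simp
        · have hupd : aUpd word l st k = st := by
            unfold aUpd; rw [if_neg hk]
          rw [hupd, List.find?_cons_of_neg (p := fun second => second != word) hk]
      · have hupd : aUpd word l st k = st := by
          unfold aUpd
          by_cases hk : (k != word) = true
          · rw [if_pos hk, if_neg hl]
          · rw [if_neg hk]
        rw [hupd, if_neg hl, if_neg hl]

-- B's scan of words = A's scan of the stored key list
theorem bFind_eq_aKeys (words : List String) (word suf : String) (hs : suf.toList ≠ []) :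
    (aKeys (aBuild words) suf).find? (fun second => second != word) = bFind words word suf := by
  rw [aKeys_find?_aBuild words suf hs, bFind, List.find?_filter]
  congr 1
  funext w
  by_cases h : w = word <;> simp [h, bne]

-- A's body over one l, characterised through B's scan
theorem aInner_eq (words : List String) (word : String) (l : Int)
    (h1 : 1 ≤ l) (h2 : l ≤ PySem.Str.len word) (st : Int × Option (String × String)) :
    aInner (aBuild words) word st l =
      if st.1 < l then
        (match bFind words word (PySem.Str.slice word (some (-l)) none) with
         | some sec => (l, some (word, sec))
         | none => st)
      else st := by
  unfold aInner
  dsimp only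
  have hs := suf_ne_nil word l h1 h2
  have key := bFind_eq_aKeys words word (PySem.Str.slice word (some (-l)) none) hs
  cases hP : (aBuild words).get? (PySem.Str.slice word (some (-l)) none) with
  | none =>
      dsimp only
      have hB : bFind words word (PySem.Str.slice word (some (-l)) none) = none := by
        rw [← key]; simp [aKeys, hP]
      rw [hB]
      by_cases hl : st.1 < l <;> simp [hl]
  | some d =>
      dsimp only
      rw [foldl_aUpd_eq]
      have hk : d.keys = aKeys (aBuild words) (PySem.Str.slice word (some (-l)) none) := by
        simp [aKeys, hP]
      rw [hk, key]

-- A's countdown loop = B's findSome? over the countdown truncated at best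
theorem countdown_eq (words : List String) (word : String) (n : Nat)
    (hn : (n : Int) ≤ PySem.Str.len word) (st : Int × Option (String × String))
    (hst : 0 ≤ st.1) :
    (PySem.List.pyRange (n : Int) 0 (-1)).foldl (aInner (aBuild words) word) st =
      (match (PySem.List.pyRange (n : Int) st.1 (-1)).findSome? (fun l =>
          (bFind words word (PySem.Str.slice word (some (-l)) none)).map (fun s => (l, s))) with
       | some (l, s) => (l, some (word, s))
       | none => st) := by
  induction n generalizing st with
  | zero =>
      rw [PySem.List.pyRange_neg_one_eq_nil (by norm_num),
          PySem.List.pyRange_neg_one_eq_nil (by exact_mod_cast hst)]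
      simp
  | succ n ih =>
      have hsub : ((n + 1 : Nat) : Int) - 1 = ((n : Nat) : Int) := by push_cast; ring
      rw [PySem.List.pyRange_neg_one_cons (by push_cast; omega), hsub, List.foldl_cons]
      rw [aInner_eq words word ((n + 1 : Nat) : Int) (by push_cast; omega) hn]
      by_cases hl : st.1 < ((n + 1 : Nat) : Int)
      · rw [if_pos hl,
            PySem.List.pyRange_neg_one_cons (a := ((n + 1 : Nat) : Int)) hl, hsub,
            List.findSome?_cons]
        cases hF : bFind words word (PySem.Str.slice word (some (-((n + 1 : Nat) : Int))) none) with
        | some sec =>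
            dsimp only [Option.map]
            rw [ih (by omega) ((((n + 1 : Nat) : Int)), some (word, sec)) (by push_cast; omega)]
            rw [PySem.List.pyRange_neg_one_eq_nil (by push_cast; omega), List.findSome?_nil]
        | none =>
            dsimp only [Option.map]
            exact ih (by omega) st hst
      · rw [if_neg hl, ih (by omega) st hst,
            PySem.List.pyRange_neg_one_eq_nil (by omega),
            PySem.List.pyRange_neg_one_eq_nil (by omega)]

theorem aStep_eq_bStep (words : List String) (word : String)
    (st : Int × Option (String × String)) (hst : 0 ≤ st.1) :
    (PySem.List.pyRange (PySem.Str.len word) 0 (-1)).foldl (aInner (aBuild words) word) st =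
      bStep words st word := by
  have h0 : 0 ≤ PySem.Str.len word := by rw [PySem.Str.len_eq]; positivity
  have h : PySem.Str.len word = (((PySem.Str.len word).toNat : Nat) : Int) :=
    (Int.toNat_of_nonneg h0).symm
  unfold bStep
  rw [h]
  exact countdown_eq words word (PySem.Str.len word).toNat (by omega) st hst

theorem bStep_nonneg (words : List String) (word : String)
    (st : Int × Option (String × String)) (hst : 0 ≤ st.1) : 0 ≤ (bStep words st word).1 := by
  unfold bStep
  cases hF : (PySem.List.pyRange (PySem.Str.len word) st.1 (-1)).findSome? (fun l =>
      (bFind words word (PySem.Str.slice word (some (-l)) none)).map (fun s => (l, s))) with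
  | none => exact hst
  | some p =>
      obtain ⟨l, s⟩ := p
      obtain ⟨a, ha, hfa⟩ := List.exists_of_findSome?_eq_some hF
      have hmem := PySem.List.mem_pyRange_neg_one.mp ha
      have : a = l := by
        cases hb : bFind words word (PySem.Str.slice word (some (-a)) none) with
        | none => rw [hb] at hfa; simp at hfa
        | some s' => rw [hb] at hfa; simp at hfa; exact hfa.1
      dsimp only
      omega

theorem foldl_eq_of_inv (ws : List String) (st : Int × Option (String × String))
    (hst : 0 ≤ st.1)
    (f g : (Int × Option (String × String)) → String → (Int × Option (String × String)))
    (hfg : ∀ st w, 0 ≤ st.1 → f st w = g st w)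
    (hg : ∀ st w, 0 ≤ st.1 → 0 ≤ (g st w).1) :
    ws.foldl f st = ws.foldl g st := by
  induction ws generalizing st with
  | nil => rfl
  | cons w ws ih =>
      rw [List.foldl_cons, List.foldl_cons, hfg st w hst]
      exact ih (g st w) (hg st w hst)

-- ===== VERDICT (by name: the statement is the Claim_ definition above) =====
theorem dict_find_spec : Claim_equal_dict_find := by
  intro words _
  unfold Spec_dict_find dict_find dict_find_alt
  exact foldl_eq_of_inv words (0, none) (by norm_num) _ _
    (fun st w h => aStep_eq_bStep words w st h)
    (fun st w h => bStep_nonneg words w st h)
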